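-- pv_equiv track=rewrite | github.com/ginesam/ccg2lambda | scripts/abduction_tools.py | InsertAxiomsInCoqScript
-- ===== SOURCE A (Python) =====
-- def GetTheoremLine(coq_script_lines):
--   for i, line in enumerate(coq_script_lines):
--     if line.startswith('Theorem '):
--       return i
--   assert False, 'There was no theorem defined in the coq script: {0}'\
--     .format('\n'.join(coq_script_lines))
--
-- def InsertAxiomsInCoqScript(axioms, coq_script):
--   coq_script_lines = coq_script.split('\n')
--   theorem_line = GetTheoremLine(coq_script_lines)
--   for axiom in axioms:
--     axiom_name = axiom.split()[1]
--     coq_script_lines.insert(theorem_line, 'Hint Resolve {0}.'.format(axiom_name))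
--     coq_script_lines.insert(theorem_line, axiom)
--   new_coq_script = '\n'.join(coq_script_lines)
--   return new_coq_script
-- ===== SOURCE B (Python) =====
-- def InsertAxiomsInCoqScript(axioms, coq_script):
--   lines = coq_script.split('\n')
--   for t, line in enumerate(lines):
--     if line.startswith('Theorem '):
--       break
--   else:
--     assert False, 'There was no theorem defined in the coq script: {0}'\
--       .format('\n'.join(lines))
--   block = [s for axiom in reversed(axioms)
--              for s in (axiom, 'Hint Resolve {0}.'.format(axiom.split()[1]))]
--   return '\n'.join(lines[:t] + block + lines[t:])
-- ===== Notes on version B (the rewrite author's own statement) =====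
-- stated objective: simpler
-- what changed: Replaces repeated in-place list.insert mutations at a fixed index with a single pass that builds the insertion block from reversed(axioms) and splices it in once with list slicing.
import Mathlib
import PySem

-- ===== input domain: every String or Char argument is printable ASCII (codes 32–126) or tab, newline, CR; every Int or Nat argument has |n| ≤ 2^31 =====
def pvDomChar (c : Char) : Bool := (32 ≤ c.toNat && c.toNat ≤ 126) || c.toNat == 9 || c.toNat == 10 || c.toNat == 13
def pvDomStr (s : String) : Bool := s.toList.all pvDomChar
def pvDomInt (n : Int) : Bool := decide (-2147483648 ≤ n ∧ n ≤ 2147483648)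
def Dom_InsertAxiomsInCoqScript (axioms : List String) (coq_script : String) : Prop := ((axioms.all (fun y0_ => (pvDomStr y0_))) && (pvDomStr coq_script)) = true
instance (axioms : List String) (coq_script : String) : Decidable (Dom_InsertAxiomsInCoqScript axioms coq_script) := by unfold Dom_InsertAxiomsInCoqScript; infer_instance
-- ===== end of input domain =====

-- B builds the insertion block once from reversed(axioms) and splices it with slicing,
-- instead of A's repeated in-place insert-at-fixed-index mutations (objective: simpler).

-- 'Hint Resolve {0}.'.format(axiom.split()[1]); the .getD "" default is only reached on
-- axioms with fewer than two words, where the Python raises IndexError (excluded by Pre_)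
def pvLines (s : String) : List String :=
  (PySem.Str.split? s "\n").getD []  -- s.split('\n'); sep is the nonempty literal, so split? is some

def pvHintLine (ax : String) : String :=
  "Hint Resolve " ++ ((PySem.List.pyGet? (PySem.Str.split₀ ax) 1).getD "") ++ "."

-- ===== PORT A =====
-- GetTheoremLine: first index whose line starts with 'Theorem '; none = AssertionError
def getTheoremLineA : List String → Option Nat
  | [] => none
  | l :: ls =>
    if PySem.Str.startswith l "Theorem " then some 0
    else (getTheoremLineA ls).map (· + 1)

def InsertAxiomsInCoqScript (axioms : List String) (coq_script : String) : String :=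
  let coq_script_lines := pvLines coq_script
  match getTheoremLineA coq_script_lines with
  | none => coq_script  -- Python raises AssertionError here (outside Pre_)
  | some theorem_line =>
    let final := axioms.foldl
      (fun ls ax =>
        PySem.List.insert
          (PySem.List.insert ls (theorem_line : Int) (pvHintLine ax))
          (theorem_line : Int) ax)
      coq_script_lines
    PySem.Str.join "\n" final

-- ===== PORT B =====
def InsertAxiomsInCoqScript_alt (axioms : List String) (coq_script : String) : String :=
  let lines := pvLines coq_script
  match lines.findIdx? (fun l => PySem.Str.startswith l "Theorem ") with
  | none => coq_script  -- Python raises AssertionError here (outside Pre_)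
  | some t =>
    let block := axioms.reverse.flatMap (fun ax => [ax, pvHintLine ax])
    PySem.Str.join "\n" (lines.take t ++ block ++ lines.drop t)

-- ===== PRECONDITION & SPEC =====
-- Pre_ excludes exactly the inputs where Python A raises: scripts with no line starting
-- with 'Theorem ' (AssertionError) and axioms with fewer than two words (IndexError)
def Pre_InsertAxiomsInCoqScript (axioms : List String) (coq_script : String) : Prop :=
  (∃ l ∈ pvLines coq_script, PySem.Str.startswith l "Theorem " = true) ∧
  ∀ ax ∈ axioms, 2 ≤ (PySem.Str.split₀ ax).length

instance (axioms : List String) (coq_script : String) : Decidable (Pre_InsertAxiomsInCoqScript axioms coq_script) := by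
  unfold Pre_InsertAxiomsInCoqScript; infer_instance

def pvWitness_InsertAxiomsInCoqScript : List String × String :=
  (["Axiom ax1 : True."], "Theorem t : True.")

def Spec_InsertAxiomsInCoqScript (axioms : List String) (coq_script : String) (out : String) : Prop := out = InsertAxiomsInCoqScript_alt axioms coq_script
instance (axioms : List String) (coq_script : String) (out : String) : Decidable (Spec_InsertAxiomsInCoqScript axioms coq_script out) := by unfold Spec_InsertAxiomsInCoqScript; infer_instance

-- ===== CLAIM (what is proved, stated in full; the proofs are below) =====
def Claim_equal_InsertAxiomsInCoqScript : Prop := ∀ (axioms : List String) (coq_script : String), Dom_InsertAxiomsInCoqScript axioms coq_script → Pre_InsertAxiomsInCoqScript axioms coq_script → Spec_InsertAxiomsInCoqScript axioms coq_script (InsertAxiomsInCoqScript axioms coq_script)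

-- ===== LEMMAS AND PROOFS =====

theorem getTheoremLineA_eq_findIdx? (ls : List String) :
    getTheoremLineA ls = ls.findIdx? (fun l => PySem.Str.startswith l "Theorem ") := by
  induction ls with
  | nil => rfl
  | cons l ls ih => simp [getTheoremLineA, List.findIdx?_cons, ih]

theorem insert_at (t : Nat) (L M : List String) (v : String) (h : t ≤ L.length) :
    PySem.List.insert (L.take t ++ (M ++ L.drop t)) (t : Int) v
      = L.take t ++ ((v :: M) ++ L.drop t) := by
  have hP : (L.take t).length = t := by simp [Nat.min_eq_left h]
  rw [PySem.List.insert_natCast _ t _ (by simp; omega)]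
  rw [List.take_left' hP, List.drop_left' hP]
  rfl

theorem loop_eq (axs : List String) (t : Nat) (L M : List String) (h : t ≤ L.length) :
    axs.foldl
      (fun ls ax =>
        PySem.List.insert
          (PySem.List.insert ls (t : Int) (pvHintLine ax))
          (t : Int) ax)
      (L.take t ++ (M ++ L.drop t))
    = L.take t ++ ((axs.reverse.flatMap (fun ax => [ax, pvHintLine ax]) ++ M)
        ++ L.drop t) := by
  induction axs generalizing M with
  | nil => simp
  | cons a axs ih =>
    rw [List.foldl_cons, insert_at t L M (pvHintLine a) h,
        insert_at t L (pvHintLine a :: M) a h, ih (a :: pvHintLine a :: M)]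
    simp

theorem loop_eq' (axs : List String) (t : Nat) (L : List String) (h : t ≤ L.length) :
    axs.foldl
      (fun ls ax =>
        PySem.List.insert
          (PySem.List.insert ls (t : Int) (pvHintLine ax))
          (t : Int) ax) L
    = L.take t ++ axs.reverse.flatMap (fun ax => [ax, pvHintLine ax]) ++ L.drop t := by
  have hL : L = L.take t ++ ([] ++ L.drop t) := by simp
  conv_lhs => rw [hL]
  rw [loop_eq axs t L [] h]
  simp

-- ===== VERDICT (by name: the statement is the Claim_ definition above) =====
theorem InsertAxiomsInCoqScript_spec : Claim_equal_InsertAxiomsInCoqScript := by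
  intro axioms coq_script _ _
  unfold Spec_InsertAxiomsInCoqScript InsertAxiomsInCoqScript InsertAxiomsInCoqScript_alt
  simp only [getTheoremLineA_eq_findIdx?]
  cases hfi : (pvLines coq_script).findIdx?
      (fun l => PySem.Str.startswith l "Theorem ") with
  | none => rfl
  | some t =>
    have ht : t ≤ (pvLines coq_script).length :=
      le_of_lt (List.findIdx?_eq_some_iff_findIdx_eq.mp hfi).1
    exact congrArg (PySem.Str.join "\n") (loop_eq' axioms t (pvLines coq_script) ht)
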